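-- pv_equiv track=rewrite | github.com/manohar890/AssignmentsDsp | Assignment18-01-23.py | maxoftriplet3
-- ===== SOURCE A (Python) =====
-- def maxoftriplet3(lis):
--     res=0
--     for i in range(len(lis)):
--         if i+1 <len(lis):
--             f=lis[i]*lis[i+1]
--             for j in range(i+2,len(lis)):
--                 if res < f*lis[j]:
--                     res=f*lis[j]
--     return res
-- ===== SOURCE B (Python) =====
-- def maxoftriplet3(lis):
--     n = len(lis)
--     if n < 3:
--         return 0
--     res = 0
--     smax = smin = lis[n - 1]
--     for i in range(n - 3, -1, -1):
--         f = lis[i] * lis[i + 1]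
--         res = max(res, f * smax, f * smin)
--         smax = max(smax, lis[i + 1])
--         smin = min(smin, lis[i + 1])
--     return res
-- ===== Notes on version B (the rewrite author's own statement) =====
-- stated objective: faster
-- what changed: Replaced the O(n^2) nested scan over later elements by a single backward pass that maintains the suffix maximum and minimum, taking max(res, f*smax, f*smin) for each adjacent pair product f.
import Mathlib
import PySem

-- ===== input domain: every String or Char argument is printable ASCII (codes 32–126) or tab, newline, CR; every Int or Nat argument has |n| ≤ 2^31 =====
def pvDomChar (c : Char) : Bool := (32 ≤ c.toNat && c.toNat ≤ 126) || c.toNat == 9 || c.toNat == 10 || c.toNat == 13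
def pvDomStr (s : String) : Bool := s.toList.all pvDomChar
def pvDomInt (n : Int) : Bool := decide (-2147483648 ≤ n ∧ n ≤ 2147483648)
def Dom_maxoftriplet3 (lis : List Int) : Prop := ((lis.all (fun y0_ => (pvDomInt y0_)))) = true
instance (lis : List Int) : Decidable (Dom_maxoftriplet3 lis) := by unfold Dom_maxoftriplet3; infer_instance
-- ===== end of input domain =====

-- B replaces A's O(n^2) nested scan by a single backward pass keeping the suffix max and min (objective: faster).

-- ===== PORT A =====
def maxoftriplet3 (lis : List Int) : Int :=
  (PySem.List.pyRange 0 (lis.length : Int) 1).foldl (fun res i =>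
    if i + 1 < (lis.length : Int) then
      let f := PySem.List.pyGetD lis i 0 * PySem.List.pyGetD lis (i + 1) 0
      (PySem.List.pyRange (i + 2) (lis.length : Int) 1).foldl
        (fun r j => if r < f * PySem.List.pyGetD lis j 0
                    then f * PySem.List.pyGetD lis j 0 else r) res
    else res) 0

-- ===== PORT B =====
-- Source B's backward loop (i from n-3 down to 0, state res/smax/smin over the suffix) as
-- structural recursion: altGo a b rest returns the loop state after processing the
-- suffix a :: b :: rest, i.e. (res, smax, smin) with smax/smin ranging over b :: rest.
def altGo (a b : Int) : List Int → Int × Int × Int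
  | [] => (0, b, b)
  | c :: rest =>
    let s := altGo b c rest
    (max (max s.1 (a * b * s.2.1)) (a * b * s.2.2), max s.2.1 b, min s.2.2 b)

def maxoftriplet3_alt (lis : List Int) : Int :=
  match lis with
  | a :: b :: c :: rest => (altGo a b (c :: rest)).1
  | _ => 0

-- ===== PRECONDITION & SPEC =====
def Spec_maxoftriplet3 (lis : List Int) (out : Int) : Prop := out = maxoftriplet3_alt lis
instance (lis : List Int) (out : Int) : Decidable (Spec_maxoftriplet3 lis out) := by unfold Spec_maxoftriplet3; infer_instance

-- ===== CLAIM (what is proved, stated in full; the proofs are below) =====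
def Claim_equal_maxoftriplet3 : Prop := ∀ (lis : List Int), Dom_maxoftriplet3 lis → Spec_maxoftriplet3 lis (maxoftriplet3 lis)

-- ===== LEMMAS AND PROOFS =====

-- common intermediate shape: A's loops re-expressed structurally on list suffixes
def outerA : Int → List Int → Int
  | res, a :: b :: t => outerA (t.foldl (fun r x => if r < a * b * x then a * b * x else r) res) (b :: t)
  | res, _ => res

def mxl (a : Int) (l : List Int) : Int := l.foldl max a
def mnl (a : Int) (l : List Int) : Int := l.foldl min a

theorem foldl_max_init (xs : List Int) : ∀ (a b : Int), xs.foldl max (max a b) = max a (xs.foldl max b) := by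
  induction xs with
  | nil => intro a b; rfl
  | cons x xs ih =>
    intro a b
    simp only [List.foldl_cons, max_assoc]
    exact ih a (max b x)

theorem foldl_min_init (xs : List Int) : ∀ (a b : Int), xs.foldl min (min a b) = min a (xs.foldl min b) := by
  induction xs with
  | nil => intro a b; rfl
  | cons x xs ih =>
    intro a b
    simp only [List.foldl_cons, min_assoc]
    exact ih a (min b x)

theorem mnl_le_mxl (a : Int) (l : List Int) : mnl a l ≤ mxl a l :=
  le_trans (PySem.List.foldl_min_le l a).1 (PySem.List.le_foldl_max l a).1

theorem mul_le_max_of_between (f lo x hi : Int) (h1 : lo ≤ x) (h2 : x ≤ hi) :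
    f * x ≤ max (f * lo) (f * hi) := by
  rcases le_total 0 f with hf|hf
  · exact le_trans (mul_le_mul_of_nonneg_left h2 hf) (le_max_right _ _)
  · exact le_trans (mul_le_mul_of_nonpos_left h1 hf) (le_max_left _ _)

-- the sign-free core fact: the best multiple of f among a, M, m (m ≤ M) is attained
-- at the maximum or the minimum of the three
theorem key_max_min (f a M m : Int) (h : m ≤ M) :
    max (f*a) (max (f*M) (f*m)) = max (f * max a M) (f * min a m) := by
  apply le_antisymm
  · apply max_le
    · exact le_trans (mul_le_max_of_between f (min a m) a (max a M) (min_le_left _ _) (le_max_left _ _)) (le_of_eq (max_comm _ _))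
    · apply max_le
      · exact le_trans (mul_le_max_of_between f (min a m) M (max a M)
          (le_trans (min_le_right _ _) h) (le_max_right _ _)) (le_of_eq (max_comm _ _))
      · exact le_trans (mul_le_max_of_between f (min a m) m (max a M)
          (min_le_right _ _) (le_trans h (le_max_right _ _))) (le_of_eq (max_comm _ _))
  · apply max_le
    · rcases max_choice a M with hc|hc <;> rw [hc]
      · exact le_max_left _ _
      · exact le_trans (le_max_left _ _) (le_max_right _ _)
    · rcases min_choice a m with hc|hc <;> rw [hc]
      · exact le_max_left _ _
      · exact le_trans (le_max_right _ _) (le_max_right _ _)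

theorem ifstep_eq_max (f : Int) :
    (fun (r x : Int) => if r < f * x then f * x else r) = fun (r x : Int) => max r (f * x) := by
  funext r x
  generalize f * x = v
  split_ifs with h <;> omega

theorem fold_fmax (f : Int) : ∀ (l : List Int) (a r : Int),
    (a :: l).foldl (fun r x => max r (f * x)) r = max r (max (f * mxl a l) (f * mnl a l)) := by
  intro l
  induction l with
  | nil => intro a r; simp [mxl, mnl]
  | cons x xs ih =>
    intro a r
    have hL : (a :: x :: xs).foldl (fun r x => max r (f * x)) r
        = max (max r (f * a)) (max (f * mxl x xs) (f * mnl x xs)) := ih x (max r (f * a))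
    rw [hL]
    have hmx : mxl a (x :: xs) = max a (mxl x xs) := by
      simp only [mxl, List.foldl_cons]; exact foldl_max_init xs a x
    have hmn : mnl a (x :: xs) = min a (mnl x xs) := by
      simp only [mnl, List.foldl_cons]; exact foldl_min_init xs a x
    rw [hmx, hmn, ← key_max_min f a (mxl x xs) (mnl x xs) (mnl_le_mxl x xs)]
    generalize f * a = pa; generalize f * mxl x xs = pM; generalize f * mnl x xs = pm
    omega

theorem inner_closed (f r a : Int) (l : List Int) :
    (a :: l).foldl (fun r x => if r < f * x then f * x else r) r
      = max r (max (f * mxl a l) (f * mnl a l)) := by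
  rw [ifstep_eq_max]; exact fold_fmax f l a r

theorem bridgeA (lis : List Int) : ∀ (suf : List Int) (k : Nat), lis.drop k = suf → ∀ res : Int,
    (PySem.List.pyRange (k : Int) (lis.length : Int) 1).foldl (fun res i =>
      if i + 1 < (lis.length : Int) then
        let f := PySem.List.pyGetD lis i 0 * PySem.List.pyGetD lis (i + 1) 0
        (PySem.List.pyRange (i + 2) (lis.length : Int) 1).foldl
          (fun r j => if r < f * PySem.List.pyGetD lis j 0
                      then f * PySem.List.pyGetD lis j 0 else r) res
      else res) res = outerA res suf := by
  intro suf
  induction suf with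
  | nil =>
    intro k hk res
    have hlen : lis.length ≤ k := by
      have := congrArg List.length hk; simp at this; omega
    rw [PySem.List.pyRange_one_eq_nil (by exact_mod_cast hlen)]
    simp [outerA]
  | cons a t ih =>
    intro k hk res
    have hlen : lis.length = k + 1 + t.length := by
      have h1 := congrArg List.length hk
      simp at h1
      omega
    have hk1 : lis.drop (k + 1) = t := by
      have : lis.drop (k + 1) = (lis.drop k).drop 1 := by
        rw [List.drop_drop]
      rw [this, hk]; rfl
    have ha : PySem.List.pyGetD lis (k : Int) 0 = a := by
      rw [PySem.List.pyGetD_natCast]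
      have h0 : (lis.drop k)[0]? = some a := by rw [hk]; rfl
      rw [List.getElem?_drop] at h0
      simp only [Nat.add_zero] at h0
      simp [List.getD, h0]
    rw [PySem.List.pyRange_one_cons (by exact_mod_cast (by omega : k < lis.length))]
    simp only [List.foldl_cons]
    cases t with
    | nil =>
      have hcond : ¬ ((k : Int) + 1 < (lis.length : Int)) := by
        simp at hlen ⊢; omega
      rw [if_neg hcond]
      have := ih (k + 1) hk1 res
      push_cast at this
      rw [this]
      simp [outerA]
    | cons b t' =>
      have hcond : (k : Int) + 1 < (lis.length : Int) := by
        have : (lis.length : Int) = (k : Int) + 1 + ((b :: t').length : Int) := by exact_mod_cast hlen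
        simp at this ⊢; omega
      rw [if_pos hcond]
      have hb : PySem.List.pyGetD lis ((k : Int) + 1) 0 = b := by
        have : ((k : Int) + 1) = ((k + 1 : Nat) : Int) := by push_cast; ring
        rw [this, PySem.List.pyGetD_natCast]
        have h0 : (lis.drop (k + 1))[0]? = some b := by rw [hk1]; rfl
        rw [List.getElem?_drop] at h0
        simp only [Nat.add_zero] at h0
        simp [List.getD, h0]
      have hk2 : lis.drop (k + 2) = t' := by
        have : lis.drop (k + 2) = (lis.drop (k + 1)).drop 1 := by rw [List.drop_drop]
        rw [this, hk1]; rfl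
      have hinner : (PySem.List.pyRange ((k : Int) + 2) (lis.length : Int) 1).foldl
          (fun r j => if r < (PySem.List.pyGetD lis (k : Int) 0 * PySem.List.pyGetD lis ((k : Int) + 1) 0) * PySem.List.pyGetD lis j 0
                      then (PySem.List.pyGetD lis (k : Int) 0 * PySem.List.pyGetD lis ((k : Int) + 1) 0) * PySem.List.pyGetD lis j 0 else r) res
          = t'.foldl (fun r x => if r < a * b * x then a * b * x else r) res := by
        rw [ha, hb]
        have h := PySem.List.foldl_pyRange_pyGetD (xs := lis) (d := (0 : Int))
          (f := fun r x => if r < a * b * x then a * b * x else r) (init := res)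
          (a := (k : Int) + 2) (by omega)
        have h2 : ((k : Int) + 2).toNat = k + 2 := by omega
        rw [h2, hk2] at h
        exact h
      have := ih (k + 1) hk1 (t'.foldl (fun r x => if r < a * b * x then a * b * x else r) res)
      push_cast at this
      rw [hinner, this]
      rfl

theorem altGo_comp2 : ∀ (t : List Int) (a b : Int),
    (altGo a b t).2.1 = mxl b t ∧ (altGo a b t).2.2 = mnl b t := by
  intro t
  induction t with
  | nil => intro a b; simp [altGo, mxl, mnl]
  | cons c rest ih =>
    intro a b
    have h := ih b c
    simp only [altGo, h.1, h.2]
    constructor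
    · simp only [mxl, List.foldl_cons]
      rw [foldl_max_init rest b c, max_comm]
    · simp only [mnl, List.foldl_cons]
      rw [foldl_min_init rest b c, min_comm]

theorem altGo_nonneg : ∀ (t : List Int) (a b : Int), 0 ≤ (altGo a b t).1 := by
  intro t
  induction t with
  | nil => intro a b; simp [altGo]
  | cons c rest ih =>
    intro a b
    simp only [altGo]
    exact le_trans (ih b c) (le_trans (le_max_left _ _) (le_max_left _ _))

theorem outer_alt : ∀ (t : List Int) (a b res : Int), 0 ≤ res →
    outerA res (a :: b :: t) = max res (altGo a b t).1 := by
  intro t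
  induction t with
  | nil =>
    intro a b res h
    simp [outerA, altGo, max_eq_left h]
  | cons c rest ih =>
    intro a b res h
    have hL : outerA res (a :: b :: c :: rest)
        = outerA ((c :: rest).foldl (fun r x => if r < a * b * x then a * b * x else r) res) (b :: c :: rest) := rfl
    rw [hL, inner_closed]
    have h' : 0 ≤ max res (max (a * b * mxl c rest) (a * b * mnl c rest)) :=
      le_trans h (le_max_left _ _)
    rw [ih b c _ h']
    have hcomp := altGo_comp2 rest b c
    have hR : (altGo a b (c :: rest)).1
        = max (max (altGo b c rest).1 (a * b * mxl c rest)) (a * b * mnl c rest) := by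
      simp only [altGo, hcomp.1, hcomp.2]
    rw [hR]
    generalize (altGo b c rest).1 = S1
    generalize a * b * mxl c rest = P
    generalize a * b * mnl c rest = Q
    omega

-- ===== VERDICT (by name: the statement is the Claim_ definition above) =====
theorem maxoftriplet3_spec : Claim_equal_maxoftriplet3 := by
  intro lis _
  unfold Spec_maxoftriplet3
  have hA : maxoftriplet3 lis = outerA 0 lis := by
    have := bridgeA lis lis 0 (by simp) 0
    simpa [maxoftriplet3] using this
  rw [hA]
  match lis with
  | [] => rfl
  | [a] => rfl
  | [a, b] => simp [outerA, maxoftriplet3_alt]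
  | a :: b :: c :: rest =>
    rw [outer_alt (c :: rest) a b 0 le_rfl]
    show _ = (altGo a b (c :: rest)).1
    exact max_eq_right (altGo_nonneg (c :: rest) a b)
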